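-- pv_equiv track=rewrite | github.com/Murray799/linear-algbra-collection | individual modules/half_rotation.py | half_rotation
-- ===== SOURCE A (Python) =====
-- def half_rotation(matrix):
--     # uses MM multiplication module
--     def MM_multiplication(matrix_1, matrix_2):
--         end_matrix = []
--         for element in range(len(matrix_1)):
--             end_matrix.append([])
--             for no_use in matrix_1:
--                 end_matrix[element].append(0)
--
--         for i in range(len(matrix_1)):
--             for j in range(len(matrix_1)):
--                 for k in range(len(matrix_1)):
--                     end_matrix[i][j] += matrix_1[i][k] * matrix_2[k][j]
--         return end_matrix
--
--     new_ = []
--     # creates a zero matrix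
--     for c in range(len(matrix)):
--         new_.append([])
--         for no_use in matrix:
--             new_[c].append(0)
--     count = 0
--     # creates a inverted basis matrix
--     for col in range(len(new_)):
--         count += 1
--         new_[col][count*-1] = 1
--
--     return MM_multiplication(matrix, new_)
-- ===== SOURCE B (Python) =====
-- def half_rotation(matrix):
--     # Right-multiplying by the n-by-n column-reversal permutation (n = len(matrix))
--     # just picks entry n-1-j of each row as output column j; no matrix product needed.
--     n = len(matrix)
--     return [[row[n - 1 - j] for j in range(n)] for row in matrix]
-- ===== Notes on version B (the rewrite author's own statement) =====
-- stated objective: faster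
-- what changed: Instead of building the n-by-n reversal permutation matrix and doing a cubic matrix-matrix multiplication, B builds each output row by directly indexing the input row at the reversed positions row[n-1-j].
import Mathlib
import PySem

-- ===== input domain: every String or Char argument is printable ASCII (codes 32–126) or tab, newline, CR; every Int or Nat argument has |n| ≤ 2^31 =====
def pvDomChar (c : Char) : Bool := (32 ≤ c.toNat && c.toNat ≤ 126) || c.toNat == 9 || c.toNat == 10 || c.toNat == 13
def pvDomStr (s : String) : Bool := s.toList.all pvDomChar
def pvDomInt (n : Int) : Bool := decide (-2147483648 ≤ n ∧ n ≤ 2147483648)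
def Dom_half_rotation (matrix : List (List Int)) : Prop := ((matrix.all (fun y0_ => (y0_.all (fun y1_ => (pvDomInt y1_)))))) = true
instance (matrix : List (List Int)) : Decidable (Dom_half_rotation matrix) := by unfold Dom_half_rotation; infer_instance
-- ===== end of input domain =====

-- B replaces A's build-the-reversal-permutation-and-multiply (cubic) by reading each output
-- row directly at the reversed positions row[n-1-j] (quadratic); objective: faster.

-- ===== PORT A =====
-- The zero-matrix construction appears verbatim twice in A (in MM_multiplication and in the
-- body); this helper is that code once: for each c in range(len(m1)) append a row that gets a
-- 0 appended for each element of m1.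
def pvZeroMatrix (m1 : List (List Int)) : List (List Int) :=
  (PySem.List.pyRange 0 (m1.length : Int) 1).foldl
    (fun acc _ => acc ++ [m1.foldl (fun row _ => row ++ [(0 : Int)]) []]) []

-- nested helper MM_multiplication, transliterated: all three loops run over range(len(matrix_1))
def pvMM_multiplication (m1 m2 : List (List Int)) : List (List Int) :=
  (PySem.List.pyRange 0 (m1.length : Int) 1).foldl (fun em i =>
    (PySem.List.pyRange 0 (m1.length : Int) 1).foldl (fun em j =>
      (PySem.List.pyRange 0 (m1.length : Int) 1).foldl (fun em k =>
        PySem.List.pySetD em i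
          (PySem.List.pySetD (PySem.List.pyGetD em i []) j
            (PySem.List.pyGetD (PySem.List.pyGetD em i []) j 0
              + PySem.List.pyGetD (PySem.List.pyGetD m1 i []) k 0
                * PySem.List.pyGetD (PySem.List.pyGetD m2 k []) j 0))) em) em)
    (pvZeroMatrix m1)

def half_rotation (matrix : List (List Int)) : List (List Int) :=
  let new0 := pvZeroMatrix matrix
  let new1 := ((PySem.List.pyRange 0 (new0.length : Int) 1).foldl
    (fun (st : List (List Int) × Int) col =>
      let count := st.2 + 1
      (PySem.List.pySetD st.1 col
        (PySem.List.pySetD (PySem.List.pyGetD st.1 col []) (count * -1) (1 : Int)), count))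
    (new0, 0)).1
  pvMM_multiplication matrix new1

-- ===== PORT B =====
-- row[n - 1 - j] is in range whenever Pre_ holds; pyGetD is its total form
def half_rotation_alt (matrix : List (List Int)) : List (List Int) :=
  matrix.map (fun row =>
    (PySem.List.pyRange 0 (matrix.length : Int) 1).map
      (fun j => PySem.List.pyGetD row ((matrix.length : Int) - 1 - j) 0))

-- ===== PRECONDITION & SPEC =====
-- Pre_ excludes exactly the matrices with a row shorter than len(matrix), on which A raises
-- IndexError during the multiplication.
def Pre_half_rotation (matrix : List (List Int)) : Prop :=
  ∀ row ∈ matrix, matrix.length ≤ row.length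
instance (matrix : List (List Int)) : Decidable (Pre_half_rotation matrix) := by
  unfold Pre_half_rotation; infer_instance

def pvWitness_half_rotation : List (List Int) := [[1, 2], [3, 4]]

def Spec_half_rotation (matrix : List (List Int)) (out : List (List Int)) : Prop :=
  out = half_rotation_alt matrix
instance (matrix : List (List Int)) (out : List (List Int)) : Decidable (Spec_half_rotation matrix out) := by
  unfold Spec_half_rotation; infer_instance

-- ===== CLAIM (what is proved, stated in full; the proofs are below) =====
def Claim_equal_half_rotation : Prop := ∀ (matrix : List (List Int)), Dom_half_rotation matrix → Pre_half_rotation matrix → Spec_half_rotation matrix (half_rotation matrix)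

-- ===== LEMMAS AND PROOFS =====

theorem pvZeroRow (m1 : List (List Int)) :
    m1.foldl (fun row _ => row ++ [(0 : Int)]) [] = List.replicate m1.length 0 := by
  rw [PySem.List.foldl_append_singleton_eq_map (fun _ => (0 : Int))]
  simp [List.map_const']

theorem pvZeroMatrix_eq (m1 : List (List Int)) :
    pvZeroMatrix m1 = (List.range m1.length).map (fun _ => List.replicate m1.length (0 : Int)) := by
  unfold pvZeroMatrix
  rw [pvZeroRow, PySem.List.foldl_append_singleton_eq_map
    (fun _ => List.replicate m1.length (0 : Int)), PySem.List.pyRange_zero_nat, List.map_map]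
  simp [Function.comp_def, List.map_const']

-- set into a map-over-range, functionally
theorem pvSetMapRange {α : Type} (f : Nat → α) (n i : Nat) (hi : i < n) (v : α) :
    ((List.range n).map f).set i v
      = (List.range n).map (fun r => if r = i then v else f r) := by
  apply List.ext_getElem
  · simp
  · intro j h1 h2
    simp only [List.getElem_set, List.getElem_map, List.getElem_range]
    by_cases h : j = i
    · subst h; simp
    · rw [if_neg (fun he => h he.symm), if_neg h]

-- negative-index assignment xs[-k] = v
theorem pvPySetD_neg {α : Type} (xs : List α) (k : Nat) (hk : 0 < k) (hle : k ≤ xs.length) (v : α) :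
    PySem.List.pySetD xs (-(k : Int)) v = xs.set (xs.length - k) v := by
  simp only [PySem.List.pySetD, PySem.List.pySet?, PySem.List.pyIdx?]
  have h0 : ¬ (0 : Int) ≤ -(k : Int) := by omega
  have h1 : -(xs.length : Int) ≤ -(k : Int) := by omega
  rw [if_neg h0, if_pos h1]
  simp

theorem pvSumIte (K k0 : Nat) (f : Nat → Int) :
    ((List.range K).map (fun k => if k = k0 then f k else 0)).sum
      = if k0 < K then f k0 else 0 := by
  induction K with
  | zero => simp
  | succ K ih =>
    rw [List.range_succ, List.map_append, List.sum_append, ih]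
    by_cases h : K = k0 <;> by_cases h2 : k0 < K <;> simp_all <;> omega

-- the permutation-building loop of A
theorem pvPermLoop (n C : Nat) (hC : C ≤ n) :
    (List.range C).foldl
      (fun (st : List (List Int) × Int) (col : Nat) =>
        (st.1.set col
          (PySem.List.pySetD (st.1.getD col []) ((st.2 + 1) * -1) (1 : Int)),
         st.2 + 1))
      ((List.range n).map (fun _ => List.replicate n (0 : Int)), 0)
    = ((List.range n).map
        (fun r => if r < C then (List.replicate n (0 : Int)).set (n - (r + 1)) 1
                  else List.replicate n (0 : Int)),
       (C : Int)) := by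
  induction C with
  | zero => simp
  | succ C ih =>
    rw [List.range_succ, List.foldl_append, ih (by omega)]
    simp only [List.foldl_cons, List.foldl_nil]
    have hget : (((List.range n).map
        (fun r => if r < C then (List.replicate n (0 : Int)).set (n - (r + 1)) 1
                  else List.replicate n (0 : Int))).getD C [])
        = List.replicate n (0 : Int) := by
      rw [PySem.List.getD_map_range _ _ _ _ (by omega)]
      simp
    rw [hget]
    have hcast : ((C : Int) + 1) * -1 = -(((C + 1 : Nat) : Int)) := by push_cast; ring
    rw [hcast, pvPySetD_neg _ _ (by omega) (by simp; omega),
      pvSetMapRange _ _ _ (by omega)]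
    refine Prod.ext ?_ (by push_cast; ring)
    apply List.map_congr_left
    intro r _
    simp only [List.length_replicate]
    by_cases h1 : r = C
    · subst h1; simp
    · by_cases h2 : r < C
      · rw [if_neg h1, if_pos h2, if_pos (by omega)]
      · rw [if_neg h1, if_neg h2, if_neg (by omega)]

theorem pvPermLoop_fst (n : Nat) :
    ((List.range n).foldl
      (fun (st : List (List Int) × Int) (col : Nat) =>
        (st.1.set col
          (PySem.List.pySetD (st.1.getD col []) ((st.2 + 1) * -1) (1 : Int)),
         st.2 + 1))
      ((List.range n).map (fun _ => List.replicate n (0 : Int)), 0)).1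
    = (List.range n).map
        (fun r => if r < n then (List.replicate n (0 : Int)).set (n - (r + 1)) 1
                  else List.replicate n (0 : Int)) := by
  rw [pvPermLoop n n (le_refl n)]

-- entry (i,k)·(k,j) of the product, as A reads it
def pvEntry (m1 m2 : List (List Int)) (i j k : Nat) : Int :=
  (m1.getD i []).getD k 0 * ((m2.getD k []).getD j 0)

theorem pvEntry_def (m1 m2 : List (List Int)) (i j k : Nat) :
    pvEntry m1 m2 i j k = (m1.getD i []).getD k 0 * ((m2.getD k []).getD j 0) := rfl

def pvS (m1 m2 : List (List Int)) (K i j : Nat) : Int :=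
  ((List.range K).map (pvEntry m1 m2 i j)).sum

-- innermost k-loop: accumulates the dot product into entry (i,j)
theorem pvKLoop (m1 m2 : List (List Int)) (em : List (List Int)) (i j K : Nat)
    (hi : i < em.length) (hj : j < (em.getD i []).length) :
    (List.range K).foldl
      (fun em (k : Nat) => em.set i ((em.getD i []).set j
        ((em.getD i []).getD j 0 + pvEntry m1 m2 i j k))) em
    = em.set i ((em.getD i []).set j ((em.getD i []).getD j 0 + pvS m1 m2 K i j)) := by
  induction K with
  | zero =>
    simp only [List.range_zero, List.foldl_nil, pvS, List.map_nil, List.sum_nil, add_zero]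
    rw [List.getD_eq_getElem _ _ hj, List.set_getElem_self,
      List.getD_eq_getElem _ _ hi, List.set_getElem_self]
  | succ K ih =>
    rw [List.range_succ, List.foldl_append, ih]
    simp only [List.foldl_cons, List.foldl_nil]
    have hgr : ((em.set i ((em.getD i []).set j ((em.getD i []).getD j 0 + pvS m1 m2 K i j))).getD i [])
        = (em.getD i []).set j ((em.getD i []).getD j 0 + pvS m1 m2 K i j) := by
      rw [List.getD_eq_getElem _ _ (by simpa using hi)]
      exact List.getElem_set_self (by simpa using hi)
    rw [hgr, List.set_set]
    have hgj : (((em.getD i []).set j ((em.getD i []).getD j 0 + pvS m1 m2 K i j)).getD j 0)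
        = (em.getD i []).getD j 0 + pvS m1 m2 K i j := by
      rw [List.getD_eq_getElem _ _ (by simpa using hj)]
      exact List.getElem_set_self (by simpa using hj)
    rw [hgj, List.set_set]
    have : pvS m1 m2 (K + 1) i j = pvS m1 m2 K i j + pvEntry m1 m2 i j K := by
      simp [pvS, List.range_succ]
    rw [this, add_assoc]

-- the accumulated row after the first J columns have been filled
def pvAccRow (S : Nat → Int) (row : List Int) : Nat → List Int
  | 0 => row
  | J + 1 => (pvAccRow S row J).set J ((pvAccRow S row J).getD J 0 + S J)

theorem pvAccRow_length (S : Nat → Int) (row : List Int) (J : Nat) :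
    (pvAccRow S row J).length = row.length := by
  induction J with
  | zero => rfl
  | succ J ih => simp [pvAccRow, ih]

theorem pvJLoop (m1 m2 : List (List Int)) (em : List (List Int)) (i K J : Nat)
    (hi : i < em.length) (hJ : J ≤ (em.getD i []).length) :
    (List.range J).foldl
      (fun em (j : Nat) =>
        (List.range K).foldl
          (fun em (k : Nat) => em.set i ((em.getD i []).set j
            ((em.getD i []).getD j 0 + pvEntry m1 m2 i j k))) em) em
    = em.set i (pvAccRow (pvS m1 m2 K i) (em.getD i []) J) := by
  induction J with
  | zero =>
    simp only [List.range_zero, List.foldl_nil, pvAccRow]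
    rw [List.getD_eq_getElem _ _ hi, List.set_getElem_self]
  | succ J ih =>
    rw [List.range_succ, List.foldl_append, ih (by omega)]
    simp only [List.foldl_cons, List.foldl_nil]
    have hilen : i < (em.set i (pvAccRow (pvS m1 m2 K i) (em.getD i []) J)).length := by
      simpa using hi
    have hget : ((em.set i (pvAccRow (pvS m1 m2 K i) (em.getD i []) J)).getD i [])
        = pvAccRow (pvS m1 m2 K i) (em.getD i []) J := by
      rw [List.getD_eq_getElem _ _ hilen]
      exact List.getElem_set_self hilen
    rw [pvKLoop m1 m2 _ i J K hilen (by rw [hget, pvAccRow_length]; omega), hget, List.set_set]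
    rfl

-- the outer i-loop of MM_multiplication
theorem pvILoop (m1 m2 : List (List Int)) (n I : Nat) (hn : n = m1.length) (hI : I ≤ n) :
    (List.range I).foldl
      (fun em (i : Nat) =>
        (List.range n).foldl
          (fun em (j : Nat) =>
            (List.range n).foldl
              (fun em (k : Nat) => em.set i ((em.getD i []).set j
                ((em.getD i []).getD j 0 + pvEntry m1 m2 i j k))) em) em)
      ((List.range n).map (fun _ => List.replicate n (0 : Int)))
    = (List.range n).map
        (fun r => if r < I then pvAccRow (pvS m1 m2 n r) (List.replicate n (0 : Int)) n
                  else List.replicate n (0 : Int)) := by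
  induction I with
  | zero => simp
  | succ I ih =>
    rw [List.range_succ, List.foldl_append, ih (by omega)]
    simp only [List.foldl_cons, List.foldl_nil]
    have hIlt : I < n := by omega
    have hget : (((List.range n).map
        (fun r => if r < I then pvAccRow (pvS m1 m2 n r) (List.replicate n (0 : Int)) n
                  else List.replicate n (0 : Int))).getD I [])
        = List.replicate n (0 : Int) := by
      rw [PySem.List.getD_map_range _ _ _ _ hIlt]; simp
    rw [pvJLoop m1 m2 _ I n n (by simpa using hIlt) (by rw [hget]; simp), hget,
      pvSetMapRange _ _ _ hIlt]
    apply List.map_congr_left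
    intro r _
    by_cases h1 : r = I
    · subst h1; simp
    · by_cases h2 : r < I
      · rw [if_neg h1, if_pos h2, if_pos (by omega)]
      · rw [if_neg h1, if_neg h2, if_neg (by omega)]

-- entries of the accumulated row
theorem pvAccRow_getElem (S : Nat → Int) (row : List Int) (J j : Nat)
    (hj : j < row.length) (hJ : J ≤ row.length) :
    (pvAccRow S row J)[j]'(by rw [pvAccRow_length]; omega)
      = if j < J then S j + row[j] else row[j] := by
  induction J with
  | zero => simp [pvAccRow]
  | succ J ih =>
    simp only [pvAccRow, List.getElem_set]
    by_cases h : J = j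
    · subst h
      rw [if_pos rfl, List.getD_eq_getElem _ _ (by rw [pvAccRow_length]; omega), ih (by omega)]
      rw [if_neg (Nat.lt_irrefl _), if_pos (by omega)]
      ring
    · rw [if_neg h, ih (by omega)]
      by_cases h2 : j < J <;> by_cases h3 : j < J + 1 <;> simp_all <;> omega

-- the sum pvS against the reversal permutation collapses to one read
theorem pvS_perm (m1 : List (List Int)) (n i j : Nat) (hn : n = m1.length) (hj : j < n) :
    pvS m1 ((List.range n).map
        (fun r => if r < n then (List.replicate n (0 : Int)).set (n - (r + 1)) 1
                  else List.replicate n (0 : Int))) n i j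
      = (m1.getD i []).getD (n - 1 - j) 0 := by
  unfold pvS
  have hstep : ∀ k ∈ List.range n,
      pvEntry m1 ((List.range n).map
        (fun r => if r < n then (List.replicate n (0 : Int)).set (n - (r + 1)) 1
                  else List.replicate n (0 : Int))) i j k
      = (if k = n - 1 - j then (m1.getD i []).getD k 0 else 0) := by
    intro k hk
    rw [List.mem_range] at hk
    unfold pvEntry
    rw [PySem.List.getD_map_range _ _ _ _ hk, if_pos hk]
    have hset : ((List.replicate n (0 : Int)).set (n - (k + 1)) 1).getD j 0
        = if j = n - (k + 1) then 1 else 0 := by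
      rw [List.getD_eq_getElem _ _ (by simpa using hj), List.getElem_set]
      split
      · simp_all
      · simp_all
        omega
    rw [hset]
    by_cases h : j = n - (k + 1)
    · rw [if_pos h, if_pos (by omega)]; ring
    · rw [if_neg h, if_neg (by omega)]; ring
  rw [List.map_congr_left hstep, pvSumIte n (n - 1 - j) (fun k => (m1.getD i []).getD k 0),
    if_pos (by omega)]

-- ===== VERDICT (by name: the statement is the Claim_ definition above) =====
theorem half_rotation_spec : Claim_equal_half_rotation := by
  intro matrix _ hPre
  unfold Spec_half_rotation
  simp only [half_rotation, half_rotation_alt, pvMM_multiplication, pvZeroMatrix_eq,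
    List.length_map, List.length_range, PySem.List.pyRange_zero_nat, List.foldl_map,
    List.map_map, PySem.List.pyGetD_natCast, PySem.List.pySetD_natCast]
  rw [pvPermLoop_fst matrix.length]
  simp only [← pvEntry_def]
  rw [pvILoop matrix _ matrix.length matrix.length rfl (le_refl _)]
  -- final extensional comparison with the reversed-index rows of B
  apply List.ext_getElem
  · simp
  · intro i h1 h2
    have hin : i < matrix.length := by simpa using h1
    have hrow : matrix.length ≤ matrix[i].length := hPre matrix[i] (List.getElem_mem hin)
    rw [List.getElem_map, List.getElem_map, List.getElem_range, if_pos hin]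
    apply List.ext_getElem
    · simp [pvAccRow_length]
    · intro j hj1 hj2
      have hjn : j < matrix.length := by
        have := hj1; rw [pvAccRow_length] at this; simpa using this
      rw [pvAccRow_getElem _ _ _ _ (by simpa using hjn) (by simp), if_pos hjn,
        pvS_perm matrix matrix.length i j rfl hjn,
        List.getElem_replicate, add_zero,
        List.getElem_map]
      simp only [Function.comp_apply, List.getElem_range]
      rw [List.getD_eq_getElem _ _ hin,
        PySem.List.pyGetD_eq_getElem _ _ (by omega) (by omega),
        List.getD_eq_getElem _ _ (by omega)]
      congr 1
      omega
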